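-- pv_equiv track=rewrite | github.com/Roxxmaro/Jeu | logimage_final.py | compte_ligne
-- ===== SOURCE A (Python) =====
-- def compte_ligne(tab):
-- #########################################
-- ### fonction compte_ligne
-- # Cette fonction permet de compter les blocs de cases (en ligne)
-- # Un bloc de cases est une serie continue de cases remplies d'un 'X'
-- # (pour compter les blocs "colonnes", il faudra appeller cette fonction en inversant le tableau
-- ######
-- # entrée : une grille de jeu (taille aléatoire)
-- # sortie : un tableau de comptage des blocs en ligne.
-- ###
-- #########################################
--     rep = []
--     n = 0
--     for i in range(len(tab)):
--         rep_inter = []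
--         for j in range(len(tab[0])):
--             if tab[i][j] == 'X':
--                 n += 1
--             elif tab[i][j] =='O'and n > 0:
--                 rep_inter.append(n)
--                 n = 0
--         if n > 0:
--             rep_inter.append(n)
--             n = 0
--         elif len(rep_inter) == 0:
--             rep_inter.append(0)
--         rep.append(rep_inter)
--     return rep
-- ===== SOURCE B (Python) =====
-- def compte_ligne(tab):
--     rep = []
--     for row in tab:
--         w = len(tab[0])
--         s = ''.join('X' if row[j] == 'X' else 'O' if row[j] == 'O' else '.'
--                     for j in range(w))
--         counts = [c for c in (seg.count('X') for seg in s.split('O')) if c > 0]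
--         rep.append(counts if counts else [0])
--     return rep
-- ===== Notes on version B (the rewrite author's own statement) =====
-- stated objective: alternative
-- what changed: Instead of threading a mutable run counter through a nested index loop with in-loop flushes, B normalizes each row to a character string, splits it on 'O', counts 'X' per segment and keeps the positive counts (falling back to [0]), so the block structure is obtained by split-and-count rather than by stateful scanning.
import Mathlib
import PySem

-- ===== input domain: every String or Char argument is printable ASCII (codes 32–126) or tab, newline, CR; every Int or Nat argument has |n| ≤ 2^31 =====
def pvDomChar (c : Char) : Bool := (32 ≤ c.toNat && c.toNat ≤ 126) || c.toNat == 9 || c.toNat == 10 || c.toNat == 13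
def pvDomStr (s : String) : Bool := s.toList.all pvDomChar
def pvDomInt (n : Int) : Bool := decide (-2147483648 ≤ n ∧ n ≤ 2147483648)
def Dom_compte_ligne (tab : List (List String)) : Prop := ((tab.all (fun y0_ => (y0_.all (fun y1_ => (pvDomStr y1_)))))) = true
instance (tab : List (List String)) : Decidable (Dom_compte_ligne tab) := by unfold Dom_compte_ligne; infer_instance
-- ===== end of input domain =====

-- B re-implements the per-row block count by normalize/split-on-'O'/count-'X' instead of A's
-- stateful nested scan with a threaded run counter; same results on Pre_ (rows at least as long
-- as the first row; on shorter rows both Pythons raise IndexError).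

-- ===== PORT A =====
def compte_ligne (tab : List (List String)) : List (List Int) :=
  ((PySem.List.pyRange 0 (PySem.List.len tab) 1).foldl
    (fun (st : List (List Int) × Int) i =>
      let st2 := (PySem.List.pyRange 0 (PySem.List.len (PySem.List.pyGetD tab 0 [])) 1).foldl
        (fun (st2 : List Int × Int) j =>
          let c := PySem.List.pyGetD (PySem.List.pyGetD tab i []) j ""
          if c = "X" then (st2.1, st2.2 + 1)
          else if c = "O" ∧ st2.2 > 0 then (st2.1 ++ [st2.2], 0)
          else st2) ([], st.2)
      let st3 := if st2.2 > 0 then (st2.1 ++ [st2.2], (0 : Int))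
                 else if st2.1.length = 0 then (st2.1 ++ [0], st2.2)
                 else st2
      (st.1 ++ [st3.1], st3.2)) (([] : List (List Int)), (0 : Int))).1

-- ===== PORT B =====
def compte_ligne_alt (tab : List (List String)) : List (List Int) :=
  tab.map (fun row =>
    let w := PySem.List.len (PySem.List.pyGetD tab 0 [])
    let s : List Char := (PySem.List.pyRange 0 w 1).map (fun j =>
      let c := PySem.List.pyGetD row j ""
      if c = "X" then 'X' else if c = "O" then 'O' else '.')
    let counts := ((PySem.Chars.splitOn s ['O']).map
        (fun seg => ((PySem.Chars.count seg ['X'] : Nat) : Int))).filter (fun c => decide (c > 0))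
    if counts = [] then [(0 : Int)] else counts)

-- ===== PRECONDITION & SPEC =====
-- Pre_ excludes exactly the ragged grids on which both Pythons raise IndexError
-- (a row shorter than the first row).
def Pre_compte_ligne (tab : List (List String)) : Prop :=
  ∀ r ∈ tab, (tab.headD []).length ≤ r.length
instance (tab : List (List String)) : Decidable (Pre_compte_ligne tab) := by
  unfold Pre_compte_ligne; infer_instance
def pvWitness_compte_ligne : List (List String) := [["X", "O"], ["O", "X"]]

def Spec_compte_ligne (tab : List (List String)) (out : List (List Int)) : Prop := out = compte_ligne_alt tab
instance (tab : List (List String)) (out : List (List Int)) : Decidable (Spec_compte_ligne tab out) := by unfold Spec_compte_ligne; infer_instance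

-- ===== CLAIM (what is proved, stated in full; the proofs are below) =====
def Claim_equal_compte_ligne : Prop := ∀ (tab : List (List String)), Dom_compte_ligne tab → Pre_compte_ligne tab → Spec_compte_ligne tab (compte_ligne tab)

-- ===== LEMMAS AND PROOFS =====

-- classify a cell the way B normalizes it
def pvCharOf (x : String) : Char := if x = "X" then 'X' else if x = "O" then 'O' else '.'

-- A's inner-loop step, expressed on the normalized character
def pvG (st : List Int × Int) (c : Char) : List Int × Int :=
  if c = 'X' then (st.1, st.2 + 1)
  else if c = 'O' ∧ st.2 > 0 then (st.1 ++ [st.2], 0)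
  else st

def pvMids : List Char → Int → List Int
  | [], _ => []
  | c :: t, n =>
    if c = 'X' then pvMids t (n + 1)
    else if c = 'O' then (if 0 < n then n :: pvMids t 0 else pvMids t n)
    else pvMids t n

def pvLast : List Char → Int → Int
  | [], n => n
  | c :: t, n =>
    if c = 'X' then pvLast t (n + 1)
    else if c = 'O' then (if 0 < n then pvLast t 0 else pvLast t n)
    else pvLast t n

def pvSplitC (c : Char) : List Char → List (List Char)
  | [] => [[]]
  | a :: t =>
    if a = c then [] :: pvSplitC c t
    else
      match pvSplitC c t with
      | [] => [[a]]
      | s :: r => (a :: s) :: r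

lemma pvSplitC_ne_nil (c : Char) (s : List Char) : pvSplitC c s ≠ [] := by
  cases s with
  | nil => simp [pvSplitC]
  | cons a t =>
    simp only [pvSplitC]
    split
    · simp
    · rcases h : pvSplitC c t with _ | ⟨x, r⟩ <;> simp

lemma pvFoldG (s : List Char) : ∀ (acc : List Int) (n : Int),
    s.foldl pvG (acc, n) = (acc ++ pvMids s n, pvLast s n) := by
  induction s with
  | nil => intro acc n; simp [pvMids, pvLast]
  | cons c t ih =>
    intro acc n
    simp only [List.foldl_cons, pvG, pvMids, pvLast]
    by_cases hx : c = 'X'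
    · simp [hx, ih]
    · by_cases ho : c = 'O'
      · by_cases hn : 0 < n
        · simp [hx, ho, hn, ih]
        · simp [hx, ho, hn, ih]
      · simp [hx, ho, ih]

lemma pvLast_nonneg (s : List Char) : ∀ n : Int, 0 ≤ n → 0 ≤ pvLast s n := by
  induction s with
  | nil => intro n hn; simpa [pvLast]
  | cons c t ih =>
    intro n hn
    simp only [pvLast]
    split_ifs <;> (first | exact ih _ (by omega) | exact ih _ hn)

-- B's positive segment counts, with the pending run n added to the first segment
def pvCounts (s : List Char) (n : Int) : List Int :=
  ((n + (((pvSplitC 'O' s).headD []).count 'X' : Int)) ::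
    ((pvSplitC 'O' s).tail).map (fun seg => ((seg.count 'X' : Nat) : Int))).filter
    (fun c => decide (c > 0))

lemma pvFlushEq (s : List Char) : ∀ n : Int, 0 ≤ n →
    pvMids s n ++ (if 0 < pvLast s n then [pvLast s n] else []) = pvCounts s n := by
  induction s with
  | nil =>
    intro n hn
    by_cases hp : 0 < n <;> simp [pvMids, pvLast, pvCounts, pvSplitC, hp]
  | cons c t ih =>
    intro n hn
    by_cases hx : c = 'X'
    · subst hx
      have h1 : pvMids ('X' :: t) n = pvMids t (n + 1) := by simp [pvMids]
      have h2 : pvLast ('X' :: t) n = pvLast t (n + 1) := by simp [pvLast]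
      rw [h1, h2, ih (n + 1) (by omega)]
      rcases hs : pvSplitC 'O' t with _ | ⟨s0, r⟩
      · exact absurd hs (pvSplitC_ne_nil 'O' t)
      · simp only [pvCounts, pvSplitC, hs]
        norm_num
        have : (n + 1) + ((s0.count 'X' : Nat) : Int) = n + ((s0.count 'X' + 1 : Nat) : Int) := by
          push_cast; ring
        simp [List.count_cons, this]
    · by_cases ho : c = 'O'
      · subst ho
        have h1 : pvMids ('O' :: t) n
            = (if 0 < n then [n] else []) ++ pvMids t (if 0 < n then 0 else n) := by
          by_cases hp : 0 < n <;> simp [pvMids, hx, hp]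
        have h2 : pvLast ('O' :: t) n = pvLast t (if 0 < n then 0 else n) := by
          by_cases hp : 0 < n <;> simp [pvLast, hx, hp]
        rw [h1, h2, List.append_assoc, ih _ (by split_ifs <;> omega)]
        rcases hs : pvSplitC 'O' t with _ | ⟨s0, r⟩
        · exact absurd hs (pvSplitC_ne_nil 'O' t)
        · have hn0 : ¬ 0 < n → n = 0 := by omega
          by_cases hp : 0 < n
          · simp [pvCounts, pvSplitC, hs, hp]
          · simp [pvCounts, pvSplitC, hs, hp, hn0 hp]
      · have h1 : pvMids (c :: t) n = pvMids t n := by simp [pvMids, hx, ho]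
        have h2 : pvLast (c :: t) n = pvLast t n := by simp [pvLast, hx, ho]
        rw [h1, h2, ih n hn]
        rcases hs : pvSplitC 'O' t with _ | ⟨s0, r⟩
        · exact absurd hs (pvSplitC_ne_nil 'O' t)
        · simp [pvCounts, pvSplitC, hs, ho, List.count_cons, hx]


lemma pvSplitGo_spec (c : Char) : ∀ (fuel : Nat) (l cur : List Char) (acc : List (List Char)),
    l.length < fuel →
    PySem.Chars.splitOn.go [c] fuel l cur acc =
      acc.reverse ++ ((cur.reverse ++ ((pvSplitC c l).headD [])) :: (pvSplitC c l).tail) := by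
  intro fuel
  induction fuel with
  | zero => intro l cur acc h; omega
  | succ f ih =>
    intro l cur acc h
    cases l with
    | nil => simp [PySem.Chars.splitOn.go, pvSplitC]
    | cons a t =>
      have hlen : t.length < f := by simpa using h
      rw [PySem.Chars.splitOn.go]
      by_cases hac : a = c
      · have hpre : [c].isPrefixOf (a :: t) = true := by
          subst hac; simp [List.isPrefixOf]
        rw [if_pos hpre]
        rw [show List.drop [c].length (a :: t) = t from rfl]
        rw [ih t [] (cur.reverse :: acc) (by omega)]
        subst hac
        rcases hs : pvSplitC a t with _ | ⟨s0, r⟩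
        · exact absurd hs (pvSplitC_ne_nil a t)
        · simp [pvSplitC, hs]
      · have hpre : [c].isPrefixOf (a :: t) = false := by
          simp [List.isPrefixOf]
          exact fun hh => absurd hh.symm hac
        rw [if_neg (by simp [hpre])]
        rw [ih t (a :: cur) acc (by omega)]
        rcases hs : pvSplitC c t with _ | ⟨s0, r⟩
        · exact absurd hs (pvSplitC_ne_nil c t)
        · simp [pvSplitC, hs, hac]

lemma pvSplitOn_eq (c : Char) (s : List Char) :
    PySem.Chars.splitOn s [c] = pvSplitC c s := by
  rw [PySem.Chars.splitOn, pvSplitGo_spec c (s.length + 1) s [] [] (by omega)]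
  rcases hs : pvSplitC c s with _ | ⟨s0, r⟩
  · exact absurd hs (pvSplitC_ne_nil c s)
  · simp

lemma pvCountGo_spec (c : Char) : ∀ (fuel : Nat) (l : List Char) (acc : Nat),
    l.length ≤ fuel →
    PySem.Chars.count.go [c] fuel l acc = acc + l.count c := by
  intro fuel
  induction fuel with
  | zero =>
    intro l acc h
    have : l = [] := by cases l <;> simp_all
    subst this; simp [PySem.Chars.count.go]
  | succ f ih =>
    intro l acc h
    cases l with
    | nil => simp [PySem.Chars.count.go]
    | cons a t =>
      have hlen : t.length ≤ f := by simpa using h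
      rw [PySem.Chars.count.go]
      by_cases hac : a = c
      · have hpre : [c].isPrefixOf (a :: t) = true := by subst hac; simp [List.isPrefixOf]
        rw [if_pos hpre, show List.drop [c].length (a :: t) = t from rfl,
          ih t (acc + 1) (by simpa using hlen)]
        subst hac
        simp [List.count_cons]
        omega
      · have hpre : [c].isPrefixOf (a :: t) = false := by
          simp [List.isPrefixOf]; exact fun hh => absurd hh.symm hac
        rw [if_neg (by simp [hpre]), ih t acc hlen]
        simp [List.count_cons, hac]

lemma pvCount_eq (c : Char) (s : List Char) :
    PySem.Chars.count s [c] = s.count c := by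
  rw [PySem.Chars.count]
  simp only [List.isEmpty_cons, if_false, Bool.false_eq_true]
  rw [pvCountGo_spec c s.length s 0 le_rfl]
  simp

lemma pvCounts_zero (s : List Char) :
    pvCounts s 0 =
      ((pvSplitC 'O' s).map (fun seg => ((seg.count 'X' : Nat) : Int))).filter
        (fun c => decide (c > 0)) := by
  rcases hs : pvSplitC 'O' s with _ | ⟨s0, r⟩
  · exact absurd hs (pvSplitC_ne_nil 'O' s)
  · simp [pvCounts, hs]

-- the normalized character row B builds
def pvRowChars (w : Int) (row : List String) : List Char :=
  (PySem.List.pyRange 0 w 1).map (fun j => pvCharOf (PySem.List.pyGetD row j ""))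

-- B's per-row result
def pvRowOut (w : Int) (row : List String) : List Int :=
  let counts := ((pvSplitC 'O' (pvRowChars w row)).map
      (fun seg => ((seg.count 'X' : Nat) : Int))).filter (fun c => decide (c > 0))
  if counts = [] then [0] else counts

-- A's inner loop
def pvRowSt (w : Int) (row : List String) (n : Int) : List Int × Int :=
  (PySem.List.pyRange 0 w 1).foldl (fun st2 j =>
    let c := PySem.List.pyGetD row j ""
    if c = "X" then (st2.1, st2.2 + 1)
    else if c = "O" ∧ st2.2 > 0 then (st2.1 ++ [st2.2], 0)
    else st2) ([], n)

lemma pvStep_eq (st : List Int × Int) (x : String) :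
    (if x = "X" then (st.1, st.2 + 1)
     else if x = "O" ∧ st.2 > 0 then (st.1 ++ [st.2], (0 : Int))
     else st) = pvG st (pvCharOf x) := by
  unfold pvG pvCharOf
  by_cases hx : x = "X"
  · simp [hx]
  · by_cases ho : x = "O" <;> simp [hx, ho]

lemma pvRowSt_eq (w : Int) (row : List String) :
    pvRowSt w row 0 = (pvMids (pvRowChars w row) 0, pvLast (pvRowChars w row) 0) := by
  unfold pvRowSt
  have hb : (fun (st2 : List Int × Int) (j : Int) =>
      let c := PySem.List.pyGetD row j ""
      if c = "X" then (st2.1, st2.2 + 1)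
      else if c = "O" ∧ st2.2 > 0 then (st2.1 ++ [st2.2], (0 : Int))
      else st2)
      = fun st2 j => pvG st2 (pvCharOf (PySem.List.pyGetD row j "")) := by
    funext st2 j
    exact pvStep_eq st2 (PySem.List.pyGetD row j "")
  rw [hb, ← List.foldl_map]
  exact pvFoldG (pvRowChars w row) [] 0

lemma pvRowFinish (w : Int) (row : List String) :
    (let st2 := pvRowSt w row 0
     if st2.2 > 0 then (st2.1 ++ [st2.2], (0 : Int))
     else if st2.1.length = 0 then (st2.1 ++ [0], st2.2)
     else st2) = (pvRowOut w row, 0) := by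
  rw [pvRowSt_eq]
  set s := pvRowChars w row with hs
  have hflush := pvFlushEq s 0 le_rfl
  rw [pvCounts_zero] at hflush
  have hlast := pvLast_nonneg s 0 le_rfl
  by_cases hp : 0 < pvLast s 0
  · simp only [hp, if_pos, gt_iff_lt]
    have : pvRowOut w row = pvMids s 0 ++ [pvLast s 0] := by
      unfold pvRowOut
      rw [← hs, ← hflush]
      simp [hp]
    rw [this]
  · have hz : pvLast s 0 = 0 := by omega
    rw [if_neg (by omega)]
    simp only [hz, if_neg] at hflush
    simp only [if_neg (by simp : ¬ (0:Int) < 0)] at hflush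
    rw [List.append_nil] at hflush
    by_cases hm : pvMids s 0 = []
    · rw [if_pos (by simp [hm])]
      unfold pvRowOut
      rw [← hs, ← hflush, hm]
      simp [hz]
    · rw [if_neg (by simp [hm])]
      unfold pvRowOut
      rw [← hs, ← hflush]
      simp [hm, hz]

lemma pvFoldIdx {A B : Type} (g : B → A → B) (xs : List A) (d : A) (init : B) :
    (PySem.List.pyRange 0 (PySem.List.len xs) 1).foldl
        (fun st i => g st (PySem.List.pyGetD xs i d)) init
      = xs.foldl g init := by
  conv_rhs => rw [← PySem.List.map_pyGetD_pyRange_zero xs d, List.foldl_map]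

lemma pvOuter (w : Int) : ∀ (l : List (List String)) (acc : List (List Int)),
    l.foldl (fun (st : List (List Int) × Int) row =>
      let st2 := pvRowSt w row st.2
      let st3 := if st2.2 > 0 then (st2.1 ++ [st2.2], (0 : Int))
                 else if st2.1.length = 0 then (st2.1 ++ [0], st2.2)
                 else st2
      (st.1 ++ [st3.1], st3.2)) (acc, 0) = (acc ++ l.map (pvRowOut w), 0) := by
  intro l
  induction l with
  | nil => intro acc; simp
  | cons r t ih =>
    intro acc
    simp only [List.foldl_cons, List.map_cons]
    rw [show (pvRowSt w r (acc, (0:Int)).2) = pvRowSt w r 0 from rfl]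
    have h := pvRowFinish w r
    simp only at h
    rw [h]
    rw [ih (acc ++ [pvRowOut w r])]
    simp

-- ===== VERDICT (by name: the statement is the Claim_ definition above) =====
theorem compte_ligne_spec : Claim_equal_compte_ligne := by
  intro tab _ _
  unfold Spec_compte_ligne
  have h3 : compte_ligne tab
      = (tab.foldl (fun (st : List (List Int) × Int) row =>
          let st2 := pvRowSt (PySem.List.len (PySem.List.pyGetD tab 0 ([] : List String))) row st.2
          let st3 := if st2.2 > 0 then (st2.1 ++ [st2.2], (0 : Int))
                     else if st2.1.length = 0 then (st2.1 ++ [0], st2.2)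
                     else st2
          (st.1 ++ [st3.1], st3.2)) (([] : List (List Int)), (0 : Int))).1 :=
    congrArg Prod.fst (pvFoldIdx
      (fun (st : List (List Int) × Int) row =>
        let st2 := pvRowSt (PySem.List.len (PySem.List.pyGetD tab 0 ([] : List String))) row st.2
        let st3 := if st2.2 > 0 then (st2.1 ++ [st2.2], (0 : Int))
                   else if st2.1.length = 0 then (st2.1 ++ [0], st2.2)
                   else st2
        (st.1 ++ [st3.1], st3.2))
      tab ([] : List String) ((([] : List (List Int)), (0 : Int))))
  rw [h3, pvOuter (PySem.List.len (PySem.List.pyGetD tab 0 ([] : List String))) tab []]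
  simp only [List.nil_append]
  unfold compte_ligne_alt
  apply List.map_congr_left
  intro row _
  simp only [pvSplitOn_eq, pvCount_eq]
  rfl
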